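-- pv_equiv track=rewrite | github.com/SoniMehta/AI-STOCK-COMPASS | ai-stock-compass-main/backend/app/services/ai_service.py | _extract_related_topics
-- ===== SOURCE A (Python) =====
-- from typing import Dict, Any, List, Optional
--
-- def _extract_related_topics(text: str) -> List[str]:
--     topics = []
--     lines = text.split('\n')
--     in_topics = False
--     for line in lines:
--         if "related topics" in line.lower() or "learn next" in line.lower():
--             in_topics = True
--             continue
--         if in_topics and line.strip().startswith('-'):
--             topics.append(line.strip().lstrip('- ').strip())
--             if len(topics) >= 3:
--                 break
--     return topics if topics else ["Understanding Stock Basics", "Reading Financial Statements", "Risk Management"]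
-- ===== SOURCE B (Python) =====
-- from typing import List
--
-- _DEFAULTS = ["Understanding Stock Basics", "Reading Financial Statements", "Risk Management"]
--
--
-- def _is_header(line: str) -> bool:
--     low = line.lower()
--     return "related topics" in low or "learn next" in low
--
--
-- def _extract_related_topics(text: str) -> List[str]:
--     lines = text.split('\n')
--     for i, line in enumerate(lines):
--         if _is_header(line):
--             break
--     else:
--         return list(_DEFAULTS)
--     topics = [l.strip().lstrip('- ').strip()
--               for l in lines[i + 1:]
--               if not _is_header(l) and l.strip().startswith('-')][:3]
--     return topics or list(_DEFAULTS)
-- ===== Notes on version B (the rewrite author's own statement) =====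
-- stated objective: alternative
-- what changed: Replaces the single stateful loop with a boolean flag by a two-phase decomposition: first find the index of the first header line, then build the topic list from the tail by a filter/map comprehension truncated to 3.
import Mathlib
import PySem

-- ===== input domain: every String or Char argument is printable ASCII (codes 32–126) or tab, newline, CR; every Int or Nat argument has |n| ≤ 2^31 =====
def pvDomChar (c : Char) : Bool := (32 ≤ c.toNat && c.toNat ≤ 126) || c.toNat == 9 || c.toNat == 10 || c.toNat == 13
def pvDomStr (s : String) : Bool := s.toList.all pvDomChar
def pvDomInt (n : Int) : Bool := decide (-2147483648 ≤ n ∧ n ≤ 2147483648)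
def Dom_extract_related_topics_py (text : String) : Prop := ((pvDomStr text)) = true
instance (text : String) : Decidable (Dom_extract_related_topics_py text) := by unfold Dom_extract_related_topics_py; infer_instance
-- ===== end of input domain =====

-- B re-decomposes A's stateful flag loop into two phases (find first header, then filter/map/take 3 on the tail); return values are proved equal everywhere.

-- shared helpers (direct ports of the Python predicates both versions use)
def pvDefaults : List String :=
  ["Understanding Stock Basics", "Reading Financial Statements", "Risk Management"]

-- "related topics" in line.lower() or "learn next" in line.lower()
def pvHeader (line : String) : Bool :=
  PySem.Str.isIn "related topics" (PySem.Str.lower line) ||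
  PySem.Str.isIn "learn next" (PySem.Str.lower line)

-- line.strip().startswith('-')
def pvDash (line : String) : Bool :=
  PySem.Str.startswith (PySem.Str.strip line) "-"

-- line.strip().lstrip('- ').strip()  (lstrip('- ') = drop leading chars from the set {'-',' '}; exact)
def pvClean (line : String) : String :=
  PySem.Str.strip
    (String.ofList ((PySem.Str.strip line).toList.dropWhile (fun c => c == '-' || c == ' ')))

-- ===== PORT A =====
-- the for-loop: state = (topics so far, in_topics flag); break modelled by returning
def pvLoopA : List String → List String → Bool → List String
  | [], topics, _ => topics
  | l :: rest, topics, inT =>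
    if pvHeader l then pvLoopA rest topics true
    else if inT && pvDash l then
      let topics' := topics ++ [pvClean l]
      if 3 ≤ topics'.length then topics'   -- break
      else pvLoopA rest topics' inT
    else pvLoopA rest topics inT

def extract_related_topics_py (text : String) : List String :=
  let topics := pvLoopA ((PySem.Str.split? text "\n").getD []) [] false
  if topics.isEmpty then pvDefaults else topics

-- ===== PORT B =====
def extract_related_topics_py_alt (text : String) : List String :=
  let lines := (PySem.Str.split? text "\n").getD []
  match lines.findIdx? pvHeader with
  | none => pvDefaults
  | some i =>
    -- lines[i+1:] : slice with nonnegative start = drop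
    let topics :=
      (((lines.drop (i + 1)).filter (fun l => !pvHeader l && pvDash l)).map pvClean).take 3
    if topics.isEmpty then pvDefaults else topics

-- ===== PRECONDITION & SPEC =====
def Spec_extract_related_topics_py (text : String) (out : List String) : Prop := out = extract_related_topics_py_alt text
instance (text : String) (out : List String) : Decidable (Spec_extract_related_topics_py text out) := by unfold Spec_extract_related_topics_py; infer_instance

-- ===== CLAIM (what is proved, stated in full; the proofs are below) =====
def Claim_equal_extract_related_topics_py : Prop := ∀ (text : String), Dom_extract_related_topics_py text → Spec_extract_related_topics_py text (extract_related_topics_py text)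

-- ===== LEMMAS AND PROOFS =====

-- once in_topics is set, the loop computes (topics ++ filtered tail).take 3 (given room left)
lemma pvLoopA_inT (rest : List String) : ∀ topics : List String, topics.length < 3 →
    pvLoopA rest topics true =
      (topics ++ ((rest.filter (fun l => !pvHeader l && pvDash l)).map pvClean)).take 3 := by
  induction rest with
  | nil =>
    intro topics h
    simp [pvLoopA, List.take_of_length_le (by omega : topics.length ≤ 3)]
  | cons l rest ih =>
    intro topics h
    simp only [pvLoopA, List.filter_cons]
    by_cases hh : pvHeader l
    · simp [hh, ih topics h]
    · by_cases hd : pvDash l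
      · simp only [hh, hd, Bool.not_false, Bool.and_self, if_true, if_false,
          List.map_cons, Bool.false_eq_true]
        by_cases h3 : 3 ≤ (topics ++ [pvClean l]).length
        · rw [if_pos h3]
          have hl : (topics ++ [pvClean l]).length = 3 := by
            simp at h3 ⊢; omega
          rw [show topics ++ pvClean l ::
                ((rest.filter (fun l => !pvHeader l && pvDash l)).map pvClean) =
              (topics ++ [pvClean l]) ++
                ((rest.filter (fun l => !pvHeader l && pvDash l)).map pvClean) from by simp,
            List.take_left' hl]
        · rw [if_neg h3, ih _ (by simp at h3 ⊢; omega)]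
          simp
      · simp [hh, hd, ih topics h]

-- with the flag still off, non-header lines are skipped
lemma pvLoopA_false (lines : List String) : ∀ topics : List String,
    pvLoopA lines topics false =
      match lines.findIdx? pvHeader with
      | none => topics
      | some i => pvLoopA (lines.drop (i + 1)) topics true := by
  induction lines with
  | nil => intro topics; simp [pvLoopA]
  | cons l rest ih =>
    intro topics
    by_cases hh : pvHeader l
    · simp [pvLoopA, hh, List.findIdx?_cons]
    · simp only [pvLoopA, hh, Bool.false_and, ih, List.findIdx?_cons]
      cases hfi : rest.findIdx? pvHeader with
      | none => simp [hfi]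
      | some i => simp [hfi]

-- ===== VERDICT (by name: the statement is the Claim_ definition above) =====
theorem extract_related_topics_py_spec : Claim_equal_extract_related_topics_py := by
  intro text _
  unfold Spec_extract_related_topics_py extract_related_topics_py extract_related_topics_py_alt
  rw [pvLoopA_false]
  cases h : ((PySem.Str.split? text "\n").getD []).findIdx? pvHeader with
  | none => simp only [h]; rfl
  | some i =>
    simp only [h]
    rw [pvLoopA_inT _ [] (by norm_num)]
    simp
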